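-- pv_equiv track=rewrite | github.com/Dodant/potential-octo | 프로그래머스/unrated/181854. 배열의 길이에 따라 다른 연산하기/배열의 길이에 따라 다른 연산하기.py | solution
-- ===== SOURCE A (Python) =====
-- def solution(arr, n):
--     answer = []
--     if len(arr) % 2 == 0:
--         for i, item in enumerate(arr):
--             if i % 2 == 1:
--                 answer.append(item + n)
--             else:
--                 answer.append(item)
--     elif len(arr) % 2 == 1:
--         for i, item in enumerate(arr):
--             if i % 2 == 0:
--                 answer.append(item + n)
--             else:
--                 answer.append(item)
--     return answer
-- ===== SOURCE B (Python) =====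
-- def solution(arr, n):
--     answer = list(arr)
--     for i in range((len(arr) + 1) % 2, len(arr), 2):
--         answer[i] += n
--     return answer
-- ===== Notes on version B (the rewrite author's own statement) =====
-- stated objective: simpler
-- what changed: B replaces A's length-parity branch with two full enumerate loops and a per-element if/else by a copy of arr plus a single step-2 strided loop over exactly the affected indices, computed from start = (len(arr)+1) % 2.
import Mathlib
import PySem

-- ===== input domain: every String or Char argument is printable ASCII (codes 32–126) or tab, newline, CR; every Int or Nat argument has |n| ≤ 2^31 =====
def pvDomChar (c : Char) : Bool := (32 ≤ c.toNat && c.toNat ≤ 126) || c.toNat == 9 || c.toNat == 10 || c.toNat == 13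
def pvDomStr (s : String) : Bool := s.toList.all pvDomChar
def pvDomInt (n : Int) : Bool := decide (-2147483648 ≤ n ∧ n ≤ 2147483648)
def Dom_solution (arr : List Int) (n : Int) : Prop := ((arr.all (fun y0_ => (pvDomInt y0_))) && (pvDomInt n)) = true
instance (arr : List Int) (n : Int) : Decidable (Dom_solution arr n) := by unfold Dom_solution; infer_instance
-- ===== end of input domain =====

-- B replaces A's length-parity branch with two full enumerate loops by a copy of arr
-- plus one step-2 strided loop over exactly the affected indices (objective: simpler).


-- ===== PORT A =====
def solution (arr : List Int) (n : Int) : List Int :=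
  let answer : List Int := []
  if PySem.Int.mod (arr.length : Int) 2 = 0 then
    (PySem.List.enumerate arr).foldl
      (fun acc p => if PySem.Int.mod p.1 2 = 1 then acc ++ [p.2 + n] else acc ++ [p.2]) answer
  else if PySem.Int.mod (arr.length : Int) 2 = 1 then
    (PySem.List.enumerate arr).foldl
      (fun acc p => if PySem.Int.mod p.1 2 = 0 then acc ++ [p.2 + n] else acc ++ [p.2]) answer
  else answer

-- ===== PORT B =====
def solution_alt (arr : List Int) (n : Int) : List Int :=
  let start := PySem.Int.mod ((arr.length : Int) + 1) 2
  (PySem.List.pyRange start (arr.length : Int) 2).foldl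
    (fun answer i => answer.set i.toNat (answer.getD i.toNat 0 + n)) arr

-- ===== PRECONDITION & SPEC =====
def Spec_solution (arr : List Int) (n : Int) (out : List Int) : Prop := out = solution_alt arr n
instance (arr : List Int) (n : Int) (out : List Int) : Decidable (Spec_solution arr n out) := by unfold Spec_solution; infer_instance

-- ===== CLAIM (what is proved, stated in full; the proofs are below) =====
def Claim_equal_solution : Prop := ∀ (arr : List Int) (n : Int), Dom_solution arr n → Spec_solution arr n (solution arr n)

-- ===== LEMMAS AND PROOFS =====

-- A-side: the append-loop over enumerate, read back pointwise.
theorem mapEnum_getElem? (f : Int × Int → Int) :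
    ∀ (xs : List Int) (s : Int) (j : Nat),
      ((PySem.List.enumerate xs s).map f)[j]? = xs[j]?.map (fun x => f (s + j, x)) := by
  intro xs
  induction xs with
  | nil => intro s j; simp [PySem.List.enumerate]
  | cons x xs ih =>
    intro s j
    rw [PySem.List.enumerate_cons]
    cases j with
    | zero => simp
    | succ j =>
      simp only [List.map_cons, List.getElem?_cons_succ, ih]
      congr 1
      funext y
      congr 2
      push_cast
      ring

-- B-side: folding index-updates over a nodup list of in-range indices, read back pointwise.
theorem fold_set_getElem? (n : Int) :
    ∀ (l : List Int) (arr : List Int), (∀ i ∈ l, 0 ≤ i ∧ i.toNat < arr.length) → l.Nodup →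
      ∀ (j : Nat),
        (l.foldl (fun answer i => answer.set i.toNat (answer.getD i.toNat 0 + n)) arr)[j]? =
          if ∃ i ∈ l, i.toNat = j then some (arr.getD j 0 + n) else arr[j]? := by
  intro l
  induction l with
  | nil => intro arr _ _ j; simp
  | cons i0 l ih =>
    intro arr hrange hnd j
    have h0 := hrange i0 (List.mem_cons_self)
    have hni : i0 ∉ l := (List.nodup_cons.mp hnd).1
    simp only [List.foldl_cons]
    generalize hv : arr.getD i0.toNat 0 + n = v
    have hrest : ∀ i ∈ l, 0 ≤ i ∧ i.toNat < (arr.set i0.toNat v).length := by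
      intro i hi; simpa using hrange i (List.mem_cons_of_mem _ hi)
    rw [ih (arr.set i0.toNat v) hrest hnd.of_cons j]
    by_cases hj : i0.toNat = j
    · subst hj
      have hmem : ¬ ∃ i ∈ l, i.toNat = i0.toNat := by
        rintro ⟨i, hil, hit⟩
        have hpos := (hrange i (List.mem_cons_of_mem _ hil)).1
        have hii : i = i0 := by omega
        exact hni (hii ▸ hil)
      rw [if_neg hmem, if_pos ⟨i0, List.mem_cons_self, rfl⟩,
        List.getElem?_set_self (by omega), hv]
    · have hset : (arr.set i0.toNat v)[j]? = arr[j]? := List.getElem?_set_ne (by omega)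
      have hsetD : (arr.set i0.toNat v).getD j 0 = arr.getD j 0 := by
        rw [List.getD_eq_getElem?_getD, hset, ← List.getD_eq_getElem?_getD]
      rw [hsetD, hset]
      congr 1
      simp only [eq_iff_iff]
      constructor
      · rintro ⟨i, hil, hit⟩; exact ⟨i, List.mem_cons_of_mem _ hil, hit⟩
      · rintro ⟨i, hil, hit⟩
        rcases List.mem_cons.mp hil with h | h
        · exact absurd (h ▸ hit) hj
        · exact ⟨i, h, hit⟩

theorem nodup_pyRange_two (a b : Int) : (PySem.List.pyRange a b 2).Nodup := by
  rw [PySem.List.pyRange_of_pos a b (by norm_num)]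
  exact (List.nodup_range).map (fun k1 k2 h => by omega)

-- ===== VERDICT =====
theorem solution_spec : Claim_equal_solution := by
  intro arr n _
  unfold Spec_solution solution solution_alt
  dsimp only
  set L : Int := (arr.length : Int) with hL
  set s : Int := PySem.Int.mod (L + 1) 2 with hs
  have hs' : s = (L + 1) % 2 := by
    rw [hs, PySem.Int.mod_eq_emod_of_pos (by norm_num)]
  have hsb : 0 ≤ s ∧ s ≤ 1 := by rw [hs']; omega
  have hrange : ∀ i ∈ PySem.List.pyRange s L 2, 0 ≤ i ∧ i.toNat < arr.length := by
    intro i hi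
    have := (PySem.List.mem_pyRange_iff_of_pos (by norm_num) i).mp hi
    omega
  have hBside := fold_set_getElem? n (PySem.List.pyRange s L 2) arr hrange
    (nodup_pyRange_two s L)
  have hmem : ∀ j : Nat, (∃ i ∈ PySem.List.pyRange s L 2, i.toNat = j) ↔
      (s ≤ (j : Int) ∧ (j : Int) < L ∧ (2 : Int) ∣ (j : Int) - s) := by
    intro j
    constructor
    · rintro ⟨i, hi, hti⟩
      obtain ⟨h1, h2, h3⟩ := (PySem.List.mem_pyRange_iff_of_pos (by norm_num) i).mp hi
      have hij : i = (j : Int) := by omega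
      subst hij; exact ⟨h1, h2, h3⟩
    · rintro ⟨h1, h2, h3⟩
      exact ⟨(j : Int), (PySem.List.mem_pyRange_iff_of_pos (by norm_num) _).mpr ⟨h1, h2, h3⟩,
        by omega⟩
  rcases PySem.Int.mod_two_eq L with hpar | hpar
  · rw [if_pos hpar]
    have hpar' : L % 2 = 0 := by
      rw [← hpar, PySem.Int.mod_eq_emod_of_pos (by norm_num)]
    have hA : (fun (acc : List Int) (p : Int × Int) =>
          if PySem.Int.mod p.1 2 = 1 then acc ++ [p.2 + n] else acc ++ [p.2])
        = (fun acc p => acc ++ [if PySem.Int.mod p.1 2 = 1 then p.2 + n else p.2]) := by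
      funext acc p; split <;> rfl
    rw [hA, PySem.List.foldl_append_singleton_eq_map
      (fun p => if PySem.Int.mod p.1 2 = 1 then p.2 + n else p.2) (PySem.List.enumerate arr) []]
    apply List.ext_getElem?
    intro j
    rw [List.nil_append, mapEnum_getElem?, hBside j, if_congr (hmem j) rfl rfl]
    cases hx : arr[j]? with
    | none =>
      have hjL : ¬ (j < arr.length) := by
        intro h; exact (List.getElem?_eq_none_iff.mp hx).not_gt h
      rw [if_neg (by omega)]
      simp
    | some v =>
      have hjL : j < arr.length := (List.getElem?_eq_some_iff.mp hx).1
      have hD : arr.getD j 0 = v := by rw [List.getD_eq_getElem?_getD, hx]; rfl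
      rw [hD]
      simp only [Option.map_some]
      rw [PySem.Int.mod_eq_emod_of_pos (by norm_num)]
      by_cases hp : ((0 : Int) + j) % 2 = 1
      · rw [if_pos hp, if_pos (by omega)]
      · rw [if_neg hp, if_neg (by omega)]
  · have hne : ¬ PySem.Int.mod L 2 = 0 := by rw [hpar]; norm_num
    rw [if_neg hne, if_pos hpar]
    have hpar' : L % 2 = 1 := by
      rw [← hpar, PySem.Int.mod_eq_emod_of_pos (by norm_num)]
    have hA : (fun (acc : List Int) (p : Int × Int) =>
          if PySem.Int.mod p.1 2 = 0 then acc ++ [p.2 + n] else acc ++ [p.2])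
        = (fun acc p => acc ++ [if PySem.Int.mod p.1 2 = 0 then p.2 + n else p.2]) := by
      funext acc p; split <;> rfl
    rw [hA, PySem.List.foldl_append_singleton_eq_map
      (fun p => if PySem.Int.mod p.1 2 = 0 then p.2 + n else p.2) (PySem.List.enumerate arr) []]
    apply List.ext_getElem?
    intro j
    rw [List.nil_append, mapEnum_getElem?, hBside j, if_congr (hmem j) rfl rfl]
    cases hx : arr[j]? with
    | none =>
      have hjL : ¬ (j < arr.length) := by
        intro h; exact (List.getElem?_eq_none_iff.mp hx).not_gt h
      rw [if_neg (by omega)]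
      simp
    | some v =>
      have hjL : j < arr.length := (List.getElem?_eq_some_iff.mp hx).1
      have hD : arr.getD j 0 = v := by rw [List.getD_eq_getElem?_getD, hx]; rfl
      rw [hD]
      simp only [Option.map_some]
      rw [PySem.Int.mod_eq_emod_of_pos (by norm_num)]
      by_cases hp : ((0 : Int) + j) % 2 = 0
      · rw [if_pos hp, if_pos (by omega)]
      · rw [if_neg hp, if_neg (by omega)]
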